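-- pv_equiv track=rewrite | github.com/amrita94/PPRidgeRegression | Horizontal partition/util.py | latticeReduction
-- ===== SOURCE A (Python) =====
-- def latticeReduction(u, v):
--     #q = round((u[0]*v[0] + u[1]*v[1])/(v[0]**2 + v[1]**2)) # round( dot(u,v)/(||v||^2) )
--     q = (u[0]*v[0] + u[1]*v[1])//(v[0]**2 + v[1]**2) # round( dot(u,v)/(||v||^2) )
--     r = [u_i - (q*v_i) for u_i, v_i in zip(u, v)]
--     u = v
--     v = r
--
--     while(u[0]**2 + u[1]**2) > (v[0]**2 + v[1]**2):
--         q = (u[0]*v[0] + u[1]*v[1])//(v[0]**2 + v[1]**2) # round( dot(u,v)/(||v||^2) )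
--         r = [u_i - (q*v_i) for u_i, v_i in zip(u, v)]
--         u = v
--         v = r
--
--     return u, v
-- ===== SOURCE B (Python) =====
-- def latticeReduction(u, v):
--     # Phase 1: run the Gauss/Euclid reduction on the 2D head pair only,
--     # recording the quotient of each step.
--     a, b = (u[0], u[1]), (v[0], v[1])
--     qs = []
--     while True:
--         q = (a[0]*b[0] + a[1]*b[1]) // (b[0]*b[0] + b[1]*b[1])
--         c = (a[0] - q*b[0], a[1] - q*b[1])
--         qs.append(q)
--         if b[0]*b[0] + b[1]*b[1] <= c[0]*c[0] + c[1]*c[1]: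
--             break
--         a, b = b, c
--     # Phase 2: replay the recorded quotients on the full vectors.
--     for q in qs:
--         u, v = v, [x - q*y for x, y in zip(u, v)]
--     return u, v
-- ===== Notes on version B (the rewrite author's own statement) =====
-- stated objective: alternative
-- what changed: Instead of A's single loop mutating the full vectors, B first runs the Euclidean/Gauss reduction on the 2D head pair alone, recording the quotient of each step, and then replays the recorded quotients over the full vectors in a second pass (the quotients and the stopping test depend only on the first two coordinates).
import Mathlib
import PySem

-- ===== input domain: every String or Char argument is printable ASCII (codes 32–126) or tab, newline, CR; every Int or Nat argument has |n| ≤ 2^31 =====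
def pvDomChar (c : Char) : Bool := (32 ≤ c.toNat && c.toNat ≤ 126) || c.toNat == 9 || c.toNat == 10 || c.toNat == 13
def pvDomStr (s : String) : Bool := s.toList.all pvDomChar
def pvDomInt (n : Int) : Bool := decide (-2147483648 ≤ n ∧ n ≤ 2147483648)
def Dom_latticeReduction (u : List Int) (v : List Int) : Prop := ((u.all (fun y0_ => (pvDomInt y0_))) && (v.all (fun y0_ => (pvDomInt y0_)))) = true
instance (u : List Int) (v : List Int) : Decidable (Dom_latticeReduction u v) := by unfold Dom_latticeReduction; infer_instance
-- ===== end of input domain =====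

-- B splits A's loop in two phases: record the Euclidean quotients on the 2D head pair, then replay them on the full vectors (objective: alternative); same return value.

-- ===== PORT A =====
-- l[i]: exact under Pre_ (both lists have length ≥ 2, so indices 0 and 1 are in range;
-- Python raises IndexError on shorter lists, which Pre_ excludes).
def pvG (l : List Int) (i : Nat) : Int := l.getD i 0

-- v[0]**2 + v[1]**2
def pvNrm (l : List Int) : Int := pvG l 0 * pvG l 0 + pvG l 1 * pvG l 1

-- q = (u[0]*v[0] + u[1]*v[1]) // (v[0]**2 + v[1]**2); r = [u_i - q*v_i for u_i, v_i in zip(u, v)]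
-- (Python raises ZeroDivisionError when pvNrm v = 0; Pre_ excludes every input reaching that).
def pvStep (u : List Int) (v : List Int) : List Int :=
  (u.zip v).map (fun p => p.1 - (PySem.Int.floordiv (pvG u 0 * pvG v 0 + pvG u 1 * pvG v 1) (pvNrm v)) * p.2)

theorem pvNrm_nonneg (l : List Int) : 0 ≤ pvNrm l := by
  have h0 := mul_self_nonneg (pvG l 0)
  have h1 := mul_self_nonneg (pvG l 1)
  unfold pvNrm; omega

-- A's while loop: state (u, v); each pass computes q, r and shifts (u, v) := (v, r).
def pvLoopA (u : List Int) (v : List Int) : List Int × List Int :=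
  if pvNrm u > pvNrm v then pvLoopA v (pvStep u v) else (u, v)
termination_by (pvNrm u).toNat
decreasing_by
  have := pvNrm_nonneg v
  omega

def latticeReduction (u : List Int) (v : List Int) : List Int × List Int :=
  pvLoopA v (pvStep u v)

-- ===== PORT B =====
-- ‖b‖² of a scalar pair
def pvNrm2 (b : Int × Int) : Int := b.1 * b.1 + b.2 * b.2

theorem pvNrm2_nonneg (b : Int × Int) : 0 ≤ pvNrm2 b := by
  have h0 := mul_self_nonneg b.1
  have h1 := mul_self_nonneg b.2
  unfold pvNrm2; omega

-- Phase 1 (Source B's while loop): the quotients of the Gauss/Euclid reduction of the head pair.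
-- q = (a0*b0 + a1*b1) // (b0*b0 + b1*b1)
def pvQ (a : Int × Int) (b : Int × Int) : Int :=
  PySem.Int.floordiv (a.1 * b.1 + a.2 * b.2) (pvNrm2 b)

-- c = (a0 - q*b0, a1 - q*b1)
def pvC (a : Int × Int) (b : Int × Int) : Int × Int :=
  (a.1 - pvQ a b * b.1, a.2 - pvQ a b * b.2)

def pvQuots (a : Int × Int) (b : Int × Int) : List Int :=
  if pvNrm2 b ≤ pvNrm2 (pvC a b) then [pvQ a b] else pvQ a b :: pvQuots b (pvC a b)
termination_by (pvNrm2 b).toNat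
decreasing_by
  have := pvNrm2_nonneg (pvC a b)
  omega

-- Phase 2 (Source B's for loop body): u, v = v, [x - q*y for x, y in zip(u, v)]
def pvReplay (uv : List Int × List Int) (q : Int) : List Int × List Int :=
  (uv.2, (uv.1.zip uv.2).map (fun p => p.1 - q * p.2))

def latticeReduction_alt (u : List Int) (v : List Int) : List Int × List Int :=
  (pvQuots (u.getD 0 0, u.getD 1 0) (v.getD 0 0, v.getD 1 0)).foldl pvReplay (u, v)

-- ===== PRECONDITION & SPEC =====
-- Exactly the inputs on which the Python A returns: both lists have length ≥ 2 (else IndexError),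
-- and the 2×2 determinant of the leading coordinates is nonzero — when it is zero the gcd-style
-- recursion drives the working vector's leading norm to 0 and A raises ZeroDivisionError.
def Pre_latticeReduction (u : List Int) (v : List Int) : Prop :=
  2 ≤ u.length ∧ 2 ≤ v.length ∧
    u.getD 0 0 * v.getD 1 0 - u.getD 1 0 * v.getD 0 0 ≠ 0
instance (u : List Int) (v : List Int) : Decidable (Pre_latticeReduction u v) := by
  unfold Pre_latticeReduction; infer_instance

def pvWitness_latticeReduction : List Int × List Int := ([3, 1], [2, 5])

def Spec_latticeReduction (u : List Int) (v : List Int) (out : List Int × List Int) : Prop := out = latticeReduction_alt u v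
instance (u : List Int) (v : List Int) (out : List Int × List Int) : Decidable (Spec_latticeReduction u v out) := by unfold Spec_latticeReduction; infer_instance

-- ===== CLAIM (what is proved, stated in full; the proofs are below) =====
def Claim_equal_latticeReduction : Prop := ∀ (u : List Int) (v : List Int), Dom_latticeReduction u v → Pre_latticeReduction u v → Spec_latticeReduction u v (latticeReduction u v)

-- ===== LEMMAS AND PROOFS =====

-- the head pair of a list
def pvHd (l : List Int) : Int × Int := (l.getD 0 0, l.getD 1 0)

theorem pvNrm_eq_nrm2 (l : List Int) : pvNrm l = pvNrm2 (pvHd l) := rfl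

theorem pvStep_len (u v : List Int) (hu : 2 ≤ u.length) (hv : 2 ≤ v.length) :
    2 ≤ (pvStep u v).length := by
  simp [pvStep]
  omega

theorem pvHd_step (u v : List Int) (hu : 2 ≤ u.length) (hv : 2 ≤ v.length) :
    pvHd (pvStep u v) =
      (pvG u 0 - PySem.Int.floordiv (pvG u 0 * pvG v 0 + pvG u 1 * pvG v 1) (pvNrm v) * pvG v 0,
       pvG u 1 - PySem.Int.floordiv (pvG u 0 * pvG v 0 + pvG u 1 * pvG v 1) (pvNrm v) * pvG v 1) := by
  match u, v with
  | a :: b :: u', c :: d :: v' =>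
    simp [pvHd, pvStep, pvG]
  | [], _ => simp at hu
  | [_], _ => simp at hu
  | _ :: _ :: _, [] => simp at hv
  | _ :: _ :: _, [_] => simp at hv

-- B's replay step with the matching quotient is A's step
theorem pvReplay_step (u v : List Int) :
    pvReplay (u, v) (PySem.Int.floordiv (pvG u 0 * pvG v 0 + pvG u 1 * pvG v 1) (pvNrm v))
      = (v, pvStep u v) := rfl

-- A's loop, entered after one step, replays B's recorded quotients.
theorem pvLoop_eq_fold (u v : List Int) (hu : 2 ≤ u.length) (hv : 2 ≤ v.length) :
    pvLoopA v (pvStep u v) = (pvQuots (pvHd u) (pvHd v)).foldl pvReplay (u, v) := by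
  rw [pvQuots.eq_def]
  have hq : pvQ (pvHd u) (pvHd v) = PySem.Int.floordiv (pvG u 0 * pvG v 0 + pvG u 1 * pvG v 1) (pvNrm v) := rfl
  have hc : pvC (pvHd u) (pvHd v) = pvHd (pvStep u v) := by
    rw [pvHd_step u v hu hv]; rfl
  have hn : pvNrm2 (pvHd v) = pvNrm v := rfl
  by_cases hstop : pvNrm2 (pvHd v) ≤ pvNrm2 (pvHd (pvStep u v))
  · -- base case: one quotient, loop guard false
    rw [if_pos (by rw [hc]; exact hstop)]
    rw [pvLoopA, if_neg (by rw [pvNrm_eq_nrm2, pvNrm_eq_nrm2]; omega)]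
    simp only [List.foldl, hq, pvReplay_step]
  · rw [if_neg (by rw [hc]; exact hstop)]
    rw [pvLoopA, if_pos (by rw [pvNrm_eq_nrm2 v, pvNrm_eq_nrm2 (pvStep u v)]; omega)]
    have ih := pvLoop_eq_fold v (pvStep u v) hv (pvStep_len u v hu hv)
    simp only [List.foldl, hq, hc, pvReplay_step, ih]
termination_by (pvNrm2 (pvHd v)).toNat
decreasing_by
  have := pvNrm2_nonneg (pvHd (pvStep u v))
  omega

-- ===== VERDICT (by name: the statement is the Claim_ definition above) =====
theorem latticeReduction_spec : Claim_equal_latticeReduction := by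
  intro u v _ hpre
  obtain ⟨hu, hv, _⟩ := hpre
  unfold Spec_latticeReduction latticeReduction latticeReduction_alt
  exact pvLoop_eq_fold u v hu hv
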